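-- pv_equiv track=rewrite | github.com/PirehP/ARPOSpublic | LoadFaceData.py | getDuplicateValue
-- ===== SOURCE A (Python) =====
-- def getDuplicateValue(ini_dict):
--     # finding duplicate values
--     flipped = {}
--     for key, value in ini_dict.items():
--         if value not in flipped:
--             flipped[value] = 1
--         else:
--             val = flipped.get(value)
--             flipped[value] = val + 1
--     key = [fps for fps, count in flipped.items() if count == max(flipped.values())]
--     return key[0]
-- ===== SOURCE B (Python) =====
-- def getDuplicateValue(ini_dict):
--     # No frequency dict at all: walk the values once, and at each FIRST
--     # occurrence of a value count it by scanning the list and keep a running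
--     # strict arg-max.  First-occurrence order + strict '>' reproduces A's
--     # tie-break (first inserted key with the maximal count).
--     vals = list(ini_dict.values())
--     seen = []
--     best = None
--     best_count = -1
--     for v in vals:
--         if v not in seen:
--             seen.append(v)
--             c = vals.count(v)
--             if best_count < c:
--                 best = v
--                 best_count = c
--     return best
-- ===== Notes on version B (the rewrite author's own statement) =====
-- stated objective: alternative
-- what changed: B drops A's frequency dict entirely: it walks the values once and, at each first occurrence, counts that value with list.count and keeps a running strict arg-max, replacing A's count-dict plus per-item recomputed max() filter.
import Mathlib
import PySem

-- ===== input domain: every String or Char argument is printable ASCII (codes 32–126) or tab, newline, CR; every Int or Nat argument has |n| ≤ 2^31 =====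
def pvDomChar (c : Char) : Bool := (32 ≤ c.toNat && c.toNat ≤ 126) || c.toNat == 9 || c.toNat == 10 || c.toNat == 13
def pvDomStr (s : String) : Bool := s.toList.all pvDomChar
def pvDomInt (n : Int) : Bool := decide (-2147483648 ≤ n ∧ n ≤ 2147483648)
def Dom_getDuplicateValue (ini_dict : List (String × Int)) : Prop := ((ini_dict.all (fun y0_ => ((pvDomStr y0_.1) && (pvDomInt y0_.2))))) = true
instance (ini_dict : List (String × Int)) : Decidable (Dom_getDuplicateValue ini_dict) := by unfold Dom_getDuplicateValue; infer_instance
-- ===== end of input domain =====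

-- B drops A's frequency dict: it walks the values once and, at each first occurrence,
-- counts that value by scanning the list (list.count) and keeps a running strict arg-max
-- (objective: alternative algorithm, no counting dict).
-- The dict parameter is modelled as its association list in insertion order (unique keys, as a Python dict has).

-- ===== PORT A =====
def getDuplicateValue (ini_dict : List (String × Int)) : Int :=
  let d0 := PySem.Dict.ofList ini_dict
  let flipped : PySem.Dict Int Int := d0.items.foldl
    (fun d p =>
      if d.contains p.2 = false then d.insert p.2 1
      else d.insert p.2 ((d.get? p.2).getD 0 + 1)) PySem.Dict.empty
  let key := (flipped.items.filter
      (fun p => some p.2 == PySem.List.max? flipped.values (fun x => x))).map (fun p => p.1)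
  (PySem.List.pyGet? key 0).getD 0   -- key[0]; Pre_ excludes the empty dict, where this is none (IndexError)

-- ===== PORT B =====
def getDuplicateValue_alt (ini_dict : List (String × Int)) : Int :=
  let vals := (PySem.Dict.ofList ini_dict).values
  let st := vals.foldl
    (fun (acc : List Int × Option Int × Int) v =>
      if acc.1.contains v then acc                    -- v in seen: skip
      else
        let c : Int := (vals.count v : Int)           -- c = vals.count(v)
        if acc.2.2 < c then (acc.1 ++ [v], some v, c) -- seen.append(v); best, best_count = v, c
        else (acc.1 ++ [v], acc.2.1, acc.2.2))        -- seen.append(v) only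
    (([], none, -1) : List Int × Option Int × Int)
  st.2.1.getD 0   -- best; Pre_ excludes the empty dict, where best is still None

-- ===== PRECONDITION & SPEC =====
-- A raises IndexError (key[0] of []) on the empty dict; nothing else is excluded.
def Pre_getDuplicateValue (ini_dict : List (String × Int)) : Prop := ini_dict ≠ []
instance (ini_dict : List (String × Int)) : Decidable (Pre_getDuplicateValue ini_dict) := by unfold Pre_getDuplicateValue; infer_instance
def pvWitness_getDuplicateValue : (List (String × Int)) := [("a", 2), ("b", 3), ("c", 2)]

def Spec_getDuplicateValue (ini_dict : List (String × Int)) (out : Int) : Prop := out = getDuplicateValue_alt ini_dict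
instance (ini_dict : List (String × Int)) (out : Int) : Decidable (Spec_getDuplicateValue ini_dict out) := by unfold Spec_getDuplicateValue; infer_instance

-- ===== CLAIM (what is proved, stated in full; the proofs are below) =====
def Claim_equal_getDuplicateValue : Prop := ∀ (ini_dict : List (String × Int)), Dom_getDuplicateValue ini_dict → Pre_getDuplicateValue ini_dict → Spec_getDuplicateValue ini_dict (getDuplicateValue ini_dict)

-- ===== LEMMAS AND PROOFS =====

-- A's two-branch counting step is the unconditional counter step.
lemma stepA_eq_stepB (d : PySem.Dict Int Int) (v : Int) :
    (if d.contains v = false then d.insert v 1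
     else d.insert v ((d.get? v).getD 0 + 1)) = d.insert v (d.getD v 0 + 1) := by
  by_cases hc : d.contains v = false
  · have h0 : d.get? v = none := (PySem.Dict.get?_eq_none_iff_contains d v).mpr hc
    rw [if_pos hc, PySem.Dict.getD_eq_get?_getD, h0]
    norm_num
  · rw [if_neg hc, PySem.Dict.getD_eq_get?_getD]

-- max? merges its first two elements into their running maximum
lemma max?_cons_cons (f : Int → Int) (b y : Int) (t : List Int) :
    PySem.List.max? (b :: y :: t) f
      = PySem.List.max? ((if f b < f y then y else b) :: t) f := by
  by_cases h : f b < f y <;> simp [PySem.List.max?, h]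

-- a head that dominates the tail is the maximum
lemma max?_cons_dominated (f : Int → Int) (t : List Int) :
    ∀ (a : Int), (∀ y ∈ t, f y ≤ f a) → PySem.List.max? (a :: t) f = some a := by
  induction t with
  | nil => intro a _; rfl
  | cons y t' ih =>
    intro a h
    rw [max?_cons_cons]
    have hy : ¬ f a < f y := not_lt.mpr (h y (by simp))
    rw [if_neg hy]
    exact ih a (fun z hz => h z (by simp [hz]))

-- prefix elements strictly below f b never survive the running maximum
lemma max?_cons_prefix (f : Int → Int) (b : Int) (suf : List Int)
    (hsuf : ∀ y ∈ suf, f y ≤ f b) :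
    ∀ (pre : List Int) (a : Int), (∀ y ∈ pre, f y < f b) → f a < f b →
      PySem.List.max? (a :: (pre ++ b :: suf)) f = some b := by
  intro pre
  induction pre with
  | nil =>
    intro a _ hab
    rw [List.nil_append, max?_cons_cons, if_pos hab]
    exact max?_cons_dominated f suf b hsuf
  | cons x pre' ih =>
    intro a hpre ha
    rw [List.cons_append, max?_cons_cons]
    have hx : f x < f b := hpre x (by simp)
    by_cases hax : f a < f x
    · rw [if_pos hax]
      exact ih x (fun y hy => hpre y (by simp [hy])) hx
    · rw [if_neg hax]
      exact ih a (fun y hy => hpre y (by simp [hy])) ha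

-- max? of a list split at its first maximum
lemma max?_of_split (f : Int → Int) (pre suf : List Int) (b : Int)
    (hpre : ∀ y ∈ pre, f y < f b) (hsuf : ∀ y ∈ suf, f y ≤ f b) :
    PySem.List.max? (pre ++ b :: suf) f = some b := by
  rcases pre with _ | ⟨x, pre'⟩
  · rw [List.nil_append]
    exact max?_cons_dominated f suf b hsuf
  · rw [List.cons_append]
    exact max?_cons_prefix f b suf hsuf pre' x
      (fun y hy => hpre y (by simp [hy])) (hpre x (by simp))

-- every nonempty list splits at the first element attaining the maximum of f
lemma exists_first_max (f : Int → Int) :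
    ∀ (l : List Int), l ≠ [] →
      ∃ pre b suf, l = pre ++ b :: suf ∧ (∀ y ∈ pre, f y < f b) ∧ (∀ y ∈ suf, f y ≤ f b) := by
  intro l
  induction l with
  | nil => intro h; exact absurd rfl h
  | cons x t ih =>
    intro _
    by_cases ht : t = []
    · exact ⟨[], x, [], by simp [ht], by simp, by simp⟩
    · obtain ⟨pre, b, suf, hsplit, hpre, hsuf⟩ := ih ht
      by_cases hxb : f x < f b
      · refine ⟨x :: pre, b, suf, by simp [hsplit], ?_, hsuf⟩
        intro y hy
        rcases List.mem_cons.mp hy with h | h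
        · exact h ▸ hxb
        · exact hpre y h
      · refine ⟨[], x, t, by simp, by simp, ?_⟩
        intro y hy
        rw [hsplit] at hy
        have hbx : f b ≤ f x := not_lt.mp hxb
        rcases List.mem_append.mp hy with h | h
        · exact le_of_lt (lt_of_lt_of_le (hpre y h) hbx)
        · rcases List.mem_cons.mp h with h | h
          · exact h ▸ hbx
          · exact le_trans (hsuf y h) hbx

-- first element of the list whose f-value equals f b, under the same split
lemma filter_head_of_split (f : Int → Int) (pre suf : List Int) (b : Int)
    (hpre : ∀ y ∈ pre, f y < f b) :
    ((pre ++ b :: suf).filter (fun k => f k == f b)).head? = some b := by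
  have hnil : pre.filter (fun k => f k == f b) = [] := by
    rw [List.filter_eq_nil_iff]
    intro a ha
    simp only [beq_iff_eq]
    exact ne_of_lt (hpre a ha)
  simp [List.filter_append, hnil]

-- inserting never empties a dict's items
lemma items_foldl_insert_ne_nil {κ ν : Type} [BEq κ] (ps : List (κ × ν)) :
    ∀ (d : PySem.Dict κ ν), d.items ≠ [] →
      (ps.foldl (fun acc p => acc.insert p.1 p.2) d).items ≠ [] := by
  induction ps with
  | nil => intro d h; exact h
  | cons p t ih =>
    intro d h
    refine ih _ ?_
    rw [PySem.Dict.items_insert]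
    split
    · simpa using h
    · exact List.append_ne_nil_of_right_ne_nil _ (by simp)

lemma ofList_items_ne_nil (ps : List (String × Int)) (h : ps ≠ []) :
    (PySem.Dict.ofList ps).items ≠ [] := by
  rcases ps with _ | ⟨p, t⟩
  · exact absurd rfl h
  · show ((p :: t).foldl (fun acc q => acc.insert q.1 q.2) PySem.Dict.empty).items ≠ []
    simp only [List.foldl_cons]
    refine items_foldl_insert_ne_nil t _ ?_
    rw [PySem.Dict.items_insert]
    split
    · simp [PySem.Dict.empty] at *
    · exact List.append_ne_nil_of_right_ne_nil _ (by simp)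

-- PySem.Set.ofList of a nonempty list is nonempty
lemma foldl_set_add_ne_nil (t : List Int) :
    ∀ (s : PySem.Set Int), s ≠ [] → t.foldl PySem.Set.add s ≠ [] := by
  induction t with
  | nil => intro s h; exact h
  | cons x t' ih =>
    intro s h
    refine ih _ ?_
    simp only [PySem.Set.add]
    split
    · exact h
    · exact List.append_ne_nil_of_right_ne_nil _ (by simp)

lemma set_ofList_ne_nil (l : List Int) (h : l ≠ []) : PySem.Set.ofList l ≠ [] := by
  rcases l with _ | ⟨x, t⟩
  · exact absurd rfl h
  · show (x :: t).foldl PySem.Set.add PySem.Set.empty ≠ []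
    simp only [List.foldl_cons]
    refine foldl_set_add_ne_nil t _ ?_
    simp [PySem.Set.add, PySem.Set.empty]

-- ===== B-side helpers (proof-only) =====

-- the selection step of B's loop body once the value is known to be new
def innerB (f : Int → Int) (st : Option Int × Int) (v : Int) : Option Int × Int :=
  if st.2 < f v then (some v, f v) else st

-- the values the guarded loop actually processes: l deduplicated against seen-set s
def newsB : List Int → List Int → List Int
  | [], _ => []
  | v :: t, s => if s.contains v then newsB t s else v :: newsB t (s ++ [v])

-- B's guarded fold splits into the seen-set and an unguarded fold over newsB
lemma foldl_stepB (f : Int → Int) (l : List Int) :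
    ∀ (s : List Int) (st : Option Int × Int),
      l.foldl
        (fun (acc : List Int × Option Int × Int) v =>
          if acc.1.contains v then acc
          else if acc.2.2 < f v then (acc.1 ++ [v], some v, f v)
          else (acc.1 ++ [v], acc.2.1, acc.2.2)) (s, st)
      = (PySem.Set.update s l, (newsB l s).foldl (innerB f) st) := by
  induction l with
  | nil => intro s st; simp [newsB, PySem.Set.update]
  | cons v t ih =>
    intro s st
    rw [List.foldl_cons, PySem.Set.update_cons]
    by_cases hc : s.contains v
    · simp only [hc, if_true, newsB]
      rw [ih s st]
      congr 1
      simp only [PySem.Set.add, PySem.Set.contains, hc, if_true]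
    · have hadd : PySem.Set.add s v = s ++ [v] := by
        simp only [PySem.Set.add, PySem.Set.contains, hc, if_false, Bool.false_eq_true]
      simp only [hc, if_false, newsB, Bool.false_eq_true, List.foldl_cons]
      rw [hadd]
      by_cases hlt : st.2 < f v
      · rw [if_pos hlt, ih]
        congr 1
        simp [innerB, hlt]
      · rw [if_neg hlt, ih]
        congr 1
        simp [innerB, hlt]

-- what the guarded loop processes, starting from the empty seen-set, is exactly set(l)
lemma update_eq_append_newsB (l : List Int) :
    ∀ (s : List Int), PySem.Set.update s l = s ++ newsB l s := by
  induction l with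
  | nil => intro s; simp [newsB, PySem.Set.update]
  | cons v t ih =>
    intro s
    rw [PySem.Set.update_cons]
    by_cases hc : s.contains v
    · have hadd : PySem.Set.add s v = s := by simp only [PySem.Set.add, PySem.Set.contains, hc, if_true]
      rw [hadd, ih s]
      simp only [newsB, hc, if_true]
    · have hadd : PySem.Set.add s v = s ++ [v] := by
        simp only [PySem.Set.add, PySem.Set.contains, hc, if_false, Bool.false_eq_true]
      rw [hadd, ih (s ++ [v])]
      simp only [newsB, hc, if_false, Bool.false_eq_true, List.append_assoc, List.cons_append, List.nil_append]

lemma newsB_nil_eq_ofList (l : List Int) : newsB l [] = PySem.Set.ofList l := by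
  have h := update_eq_append_newsB l []
  rw [PySem.Set.update_nil_left] at h
  simpa using h.symm

-- a running best that already dominates the tail never changes
lemma innerB_dominated (f : Int → Int) (t : List Int) :
    ∀ (bc : Option Int × Int), (∀ y ∈ t, f y ≤ bc.2) →
      t.foldl (innerB f) bc = bc := by
  induction t with
  | nil => intro bc _; rfl
  | cons y t' ih =>
    intro bc h
    rw [List.foldl_cons]
    have hy : ¬ bc.2 < f y := not_lt.mpr (h y (by simp))
    rw [show innerB f bc y = bc by simp [innerB, hy]]
    exact ih bc (fun z hz => h z (by simp [hz]))

-- the running strict arg-max lands on the first maximum of the split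
lemma innerB_split (f : Int → Int) (b : Int) (suf : List Int)
    (hsuf : ∀ y ∈ suf, f y ≤ f b) :
    ∀ (pre : List Int) (st : Option Int × Int),
      (∀ y ∈ pre, f y < f b) → st.2 < f b →
      (pre ++ b :: suf).foldl (innerB f) st = (some b, f b) := by
  intro pre
  induction pre with
  | nil =>
    intro st _ hst
    rw [List.nil_append, List.foldl_cons]
    rw [show innerB f st b = (some b, f b) by simp [innerB, hst]]
    exact innerB_dominated f suf (some b, f b) (by simpa using hsuf)
  | cons x pre' ih =>
    intro st hpre hst
    rw [List.cons_append, List.foldl_cons]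
    have hx : f x < f b := hpre x (by simp)
    by_cases hlt : st.2 < f x
    · rw [show innerB f st x = (some x, f x) by simp [innerB, hlt]]
      exact ih (some x, f x) (fun y hy => hpre y (by simp [hy])) hx
    · rw [show innerB f st x = st by simp [innerB, hlt]]
      exact ih st (fun y hy => hpre y (by simp [hy])) hst

-- ===== VERDICT (by name: the statement is the Claim_ definition above) =====
theorem getDuplicateValue_spec : Claim_equal_getDuplicateValue := by
  intro ini_dict _ hpre
  unfold Spec_getDuplicateValue getDuplicateValue getDuplicateValue_alt
  dsimp only
  set d0 := PySem.Dict.ofList ini_dict with hd0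
  set l := d0.values with hl
  set f : Int → Int := fun k => (l.count k : Int) with hf
  -- A's counting loop builds Counter(l)
  have hA : d0.items.foldl
      (fun d p =>
        if d.contains p.2 = false then d.insert p.2 1
        else d.insert p.2 ((d.get? p.2).getD 0 + 1)) (PySem.Dict.empty : PySem.Dict Int Int)
      = PySem.Dict.counter l := by
    have h1 : d0.items.foldl
        (fun d p =>
          if d.contains p.2 = false then d.insert p.2 1
          else d.insert p.2 ((d.get? p.2).getD 0 + 1)) (PySem.Dict.empty : PySem.Dict Int Int)
        = d0.items.foldl (fun d p => d.insert p.2 (d.getD p.2 0 + 1)) PySem.Dict.empty := by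
      congr 1
      funext d p
      exact stepA_eq_stepB d p.2
    rw [h1, hl]
    show _ = PySem.Dict.counter (d0.items.map (fun p => p.2))
    rw [← PySem.Dict.foldl_insert_getD_add_one_eq_counter, List.foldl_map]
  rw [hA]
  set ks := PySem.Set.ofList l with hks
  have hitems : (PySem.Dict.counter l).items = ks.map (fun k => (k, f k)) :=
    PySem.Dict.items_counter l
  have hvalues : (PySem.Dict.counter l).values = ks.map f := by
    show (PySem.Dict.counter l).items.map (fun p => p.2) = ks.map f
    rw [hitems, List.map_map]
    rfl
  -- nonemptiness
  have hlne : l ≠ [] := by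
    rw [hl]
    intro hcon
    exact ofList_items_ne_nil ini_dict hpre (List.map_eq_nil_iff.mp hcon)
  have hksne : ks ≠ [] := set_ofList_ne_nil l hlne
  -- split ks at its first maximum count
  obtain ⟨pre, b, suf, hsplit, hpre', hsuf'⟩ := exists_first_max f ks hksne
  -- A's max over the counter's values is f b
  have hmaxv : PySem.List.max? ((PySem.Dict.counter l).values) (fun x => x) = some (f b) := by
    rw [hvalues, hsplit, List.map_append, List.map_cons]
    exact max?_of_split (fun x => x) (pre.map f) (suf.map f) (f b)
      (by intro y hy; obtain ⟨z, hz, rfl⟩ := List.mem_map.mp hy; exact hpre' z hz)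
      (by intro y hy; obtain ⟨z, hz, rfl⟩ := List.mem_map.mp hy; exact hsuf' z hz)
  rw [hmaxv]
  -- A's filtered key list is the filter of ks; its head is b
  have hcomp : ((fun p : Int × Int => some p.2 == some (f b)) ∘ (fun k => (k, f k)))
      = fun k => f k == f b := by
    funext k; simp
  have hfilter : ((PySem.Dict.counter l).items.filter
        (fun p => some p.2 == some (f b))).map (fun p => p.1)
      = ks.filter (fun k => f k == f b) := by
    rw [hitems, List.filter_map, hcomp, List.map_map]
    exact List.map_id' _
  rw [hfilter]
  have hhead : (ks.filter (fun k => f k == f b)).head? = some b := by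
    rw [hsplit]; exact filter_head_of_split f pre suf b hpre'
  -- B's guarded loop is the running arg-max over ks, which also lands on b
  have hB : (l.foldl
      (fun (acc : List Int × Option Int × Int) v =>
        if acc.1.contains v then acc
        else if acc.2.2 < f v then (acc.1 ++ [v], some v, f v)
        else (acc.1 ++ [v], acc.2.1, acc.2.2)) (([], none, -1) : List Int × Option Int × Int)).2.1
      = some b := by
    rw [foldl_stepB f l [] (none, -1), newsB_nil_eq_ofList, ← hks, hsplit]
    have hbml : b ∈ l := by
      have : b ∈ ks := by rw [hsplit]; simp
      exact (PySem.Set.mem_ofList l b).mp (hks ▸ this)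
    have hfb : (1 : Int) ≤ f b := by
      rw [hf]
      show (1 : Int) ≤ (l.count b : Int)
      exact_mod_cast List.one_le_count_iff.mpr hbml
    rw [innerB_split f b suf hsuf' pre (none, -1) hpre' (by simpa using lt_of_lt_of_le (by norm_num) hfb)]
  rw [hB]
  rcases hlist : ks.filter (fun k => f k == f b) with _ | ⟨y, t⟩
  · rw [hlist] at hhead; simp at hhead
  · rw [hlist] at hhead
    simp only [List.head?_cons, Option.some.injEq] at hhead
    subst hhead
    simp [PySem.List.pyGet?, PySem.List.pyIdx?]
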